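-- pv_equiv track=rewrite | github.com/makurell/AnswerBot | answerbot.py | get_query_combs
-- ===== SOURCE A (Python) =====
-- import itertools
--
-- def get_query_combs(query):
--     """
--     :return: list of combinations of splitting up the query
--     """
--     # want to get every combination of how to split up the entries in a list
--     # way of representing the commas: 0=no comma, 1=comma
--     # We want the binary combinations of length `(amount of entries)-1`
--     # which indicate to whether to have a 'comma' at each point between the entries
--     # ---
--     # Example: consider the lists A and B
--     # 0  1  2  3 <-- A: entries
--     #  0  1   2  <-- B: can be thought of as positions for commas.
--     # to get every combination of how to split up the entries in A
--     # (like [0123],[012,3],[01,23],[01,2,3] etc)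
--     # you must get every arrangement of B (the commas in-between the entries)
--     # let's say 0 = no comma, 1 = comma
--     # the possible arrangements of B will be
--     # 001,010,011,101,110,111
--     # this is the binary pattern
--
--     ret=[]
--     for split_config in itertools.product([0,1],repeat=len(query)-1):
--         obuf=[]
--         buf=[]
--         for i in range(len(split_config)):
--             buf.append(query[i])
--             if split_config[i]: # if there is a 'comma' after the entry
--                 #flush buf to obuf
--                 obuf.append(buf)
--                 buf=[]
--         buf.append(query[-1]) # last item will never 'have a comma' after it
--         obuf.append(buf) # flush buf to obuf
--         ret.append(obuf) # flush obuf to ret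
--     return ret
-- ===== SOURCE B (Python) =====
-- def get_query_combs(query):
--     """
--     :return: list of combinations of splitting up the query
--     """
--     # Recursive decomposition: at each gap choose 'no comma' first, then 'comma';
--     # leftmost gap outermost reproduces itertools.product's enumeration order.
--     res = []
--
--     def go(i, groups, cur):
--         if i == len(query):
--             res.append(groups + [cur])
--         else:
--             go(i + 1, groups, cur + [query[i]])
--             go(i + 1, groups + [cur], [query[i]])
--
--     go(1, [], [query[0]])
--     return res
-- ===== Notes on version B (the rewrite author's own statement) =====
-- stated objective: alternative
-- what changed: Replaces the two-phase 'enumerate all binary comma-patterns with itertools.product, then re-scan the query for each pattern' with a single recursive walk over the gaps that carries the partition built so far, branching no-comma-first so the enumeration order matches product's; shared prefixes are built once instead of per pattern.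
import Mathlib
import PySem

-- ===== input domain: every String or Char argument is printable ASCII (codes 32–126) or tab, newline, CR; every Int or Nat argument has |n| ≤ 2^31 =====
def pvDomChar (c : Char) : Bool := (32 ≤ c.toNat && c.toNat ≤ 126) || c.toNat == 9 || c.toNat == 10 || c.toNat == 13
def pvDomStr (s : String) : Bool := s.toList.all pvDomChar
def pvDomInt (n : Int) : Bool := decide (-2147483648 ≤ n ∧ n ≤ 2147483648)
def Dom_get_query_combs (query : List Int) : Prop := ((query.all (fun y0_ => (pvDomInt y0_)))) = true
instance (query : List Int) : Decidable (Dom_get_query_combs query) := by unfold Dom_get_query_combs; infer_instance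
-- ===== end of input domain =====

-- B is a one-pass recursive enumeration (no-comma branch first) instead of A's
-- product-of-binary-patterns followed by a re-scan of the query per pattern (shared prefixes built once).

-- ===== PORT A =====
-- itertools.product([0,1], repeat=n): leftmost position varies slowest, 0 before 1
def pvProdA : Nat → List (List Int)
  | 0 => [[]]
  | n + 1 => ((pvProdA n).map (fun t => 0 :: t)) ++ ((pvProdA n).map (fun t => 1 :: t))

-- the body of A's outer loop: build obuf/buf by scanning split_config by index, then flush the last entry
def pvInnerA (query : List Int) (sc : List Int) : List (List Int) :=
  let st := (PySem.List.pyRange 0 (sc.length : Int) 1).foldl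
    (fun (s : List (List Int) × List Int) i =>
      let buf := s.2 ++ [PySem.List.pyGetD query i 0]
      if PySem.List.pyGetD sc i 0 ≠ 0 then (s.1 ++ [buf], []) else (s.1, buf))
    ([], [])
  st.1 ++ [st.2 ++ [PySem.List.pyGetD query (-1) 0]]

def get_query_combs (query : List Int) : List (List (List Int)) :=
  (pvProdA (query.length - 1)).foldl (fun ret sc => ret ++ [pvInnerA query sc]) []

-- ===== PORT B =====
-- go(i, groups, cur): no-comma branch first, then comma branch
def pvGoAlt : List Int → List (List Int) → List Int → List (List (List Int))
  | [], groups, cur => [groups ++ [cur]]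
  | x :: xs, groups, cur => pvGoAlt xs groups (cur ++ [x]) ++ pvGoAlt xs (groups ++ [cur]) [x]

def get_query_combs_alt (query : List Int) : List (List (List Int)) :=
  match query with
  | [] => []   -- unreached under Pre_ (Python B raises IndexError here, as A raises ValueError)
  | x :: xs => pvGoAlt xs [] [x]

-- ===== PRECONDITION & SPEC =====
-- Pre_ excludes only the empty query, on which A raises ValueError (product(repeat=-1)) and B raises IndexError.
def Pre_get_query_combs (query : List Int) : Prop := query ≠ []
instance (query : List Int) : Decidable (Pre_get_query_combs query) := by unfold Pre_get_query_combs; infer_instance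
def pvWitness_get_query_combs : List Int := ([1, 2, 3])

def Spec_get_query_combs (query : List Int) (out : List (List (List Int))) : Prop := out = get_query_combs_alt query
instance (query : List Int) (out : List (List (List Int))) : Decidable (Spec_get_query_combs query out) := by unfold Spec_get_query_combs; infer_instance

-- ===== CLAIM (what is proved, stated in full; the proofs are below) =====
def Claim_equal_get_query_combs : Prop := ∀ (query : List Int), Dom_get_query_combs query → Pre_get_query_combs query → Spec_get_query_combs query (get_query_combs query)

-- ===== LEMMAS AND PROOFS =====

-- structural restatement of A's inner index loop (proved equal below)
def pvRunA : List Int → List Int → List (List Int) × List Int → List (List Int) × List Int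
  | [], _, st => st
  | _ :: _, [], st => st
  | d :: ds, q :: qs, (obuf, buf) =>
      if d ≠ 0 then pvRunA ds qs (obuf ++ [buf ++ [q]], []) else pvRunA ds qs (obuf, buf ++ [q])

-- structural restatement of one branch of B's recursion as a run over a fixed split config
def pvRunB : List Int → List Int → List (List Int) × List Int → List (List Int)
  | [], _, (groups, cur) => groups ++ [cur]
  | _ :: _, [], (groups, cur) => groups ++ [cur]
  | d :: ds, x :: xs, (groups, cur) =>
      if d ≠ 0 then pvRunB ds xs (groups ++ [cur], [x]) else pvRunB ds xs (groups, cur ++ [x])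

lemma pvProdA_length {n : Nat} {sc : List Int} (h : sc ∈ pvProdA n) : sc.length = n := by
  induction n generalizing sc with
  | zero => simp [pvProdA] at h; simp [h]
  | succ n ih =>
    simp [pvProdA] at h
    rcases h with ⟨t, ht, rfl⟩ | ⟨t, ht, rfl⟩ <;> simp [ih ht]

-- A's index loop over range(len sc) computes pvRunA
lemma pvInnerA_loop (sc q : List Int) (st : List (List Int) × List Int)
    (h : sc.length ≤ q.length) :
    (PySem.List.pyRange 0 (sc.length : Int) 1).foldl
      (fun (s : List (List Int) × List Int) i =>
        let buf := s.2 ++ [PySem.List.pyGetD q i 0]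
        if PySem.List.pyGetD sc i 0 ≠ 0 then (s.1 ++ [buf], []) else (s.1, buf))
      st = pvRunA sc q st := by
  induction sc generalizing q st with
  | nil => simp [pvRunA]
  | cons d ds ih =>
    cases q with
    | nil => simp at h
    | cons x xs =>
      have hb : ((d :: ds).length : Int) = ((ds.length + 1 : Nat) : Int) := by simp
      rw [hb, PySem.List.pyRange_zero_natCast, List.range_succ_eq_map, List.map_cons,
          List.foldl_cons, List.map_map, List.foldl_map]
      have hfe : (fun (s : List (List Int) × List Int) (k : Nat) =>
            (fun (s : List (List Int) × List Int) (i : Int) =>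
              let buf := s.2 ++ [PySem.List.pyGetD (x :: xs) i 0]
              if PySem.List.pyGetD (d :: ds) i 0 ≠ 0 then (s.1 ++ [buf], []) else (s.1, buf))
              s (((fun k => ((k : Nat) : Int)) ∘ Nat.succ) k)) =
          (fun (s : List (List Int) × List Int) (k : Nat) =>
            (fun (s : List (List Int) × List Int) (i : Int) =>
              let buf := s.2 ++ [PySem.List.pyGetD xs i 0]
              if PySem.List.pyGetD ds i 0 ≠ 0 then (s.1 ++ [buf], []) else (s.1, buf))
              s ((k : Nat) : Int)) := by
        funext s k
        simp only [Function.comp, PySem.List.pyGetD_natCast, List.getD_cons_succ]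
      rw [hfe]
      have ih' := ih xs ((fun (s : List (List Int) × List Int) (i : Int) =>
            let buf := s.2 ++ [PySem.List.pyGetD (x :: xs) i 0]
            if PySem.List.pyGetD (d :: ds) i 0 ≠ 0 then (s.1 ++ [buf], []) else (s.1, buf))
            st (((0 : Nat) : Int))) (by simpa using h)
      rw [PySem.List.pyRange_zero_natCast, List.foldl_map] at ih'
      rw [ih']
      obtain ⟨obuf, buf⟩ := st
      by_cases hd : d = 0 <;> simp [pvRunA, hd]

-- relate A's run (element appended before its decision, last element flushed after)
-- to B's run (decision taken before the next element is appended)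
lemma pvRunA_runB (sc : List Int) (x : Int) (xs : List Int)
    (groups : List (List Int)) (cur : List Int) (h : sc.length = xs.length) :
    pvRunB sc xs (groups, cur ++ [x]) =
      (pvRunA sc (x :: xs) (groups, cur)).1 ++
        [(pvRunA sc (x :: xs) (groups, cur)).2 ++
          [(x :: xs).getLast (List.cons_ne_nil x xs)]] := by
  induction sc generalizing x xs groups cur with
  | nil =>
    cases xs with
    | nil => simp [pvRunA, pvRunB]
    | cons y ys => simp at h
  | cons d ds ih =>
    cases xs with
    | nil => simp at h
    | cons y ys =>
      simp only [List.length_cons, Nat.succ.injEq] at h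
      have hlast : (x :: y :: ys).getLast (List.cons_ne_nil _ _) =
          (y :: ys).getLast (List.cons_ne_nil _ _) := by
        simp [List.getLast]
      by_cases hd : d = 0
      · simp only [pvRunA, pvRunB, hd, ne_eq, not_true_eq_false, if_neg, not_false_eq_true]
        rw [show cur ++ [x] ++ [y] = (cur ++ [x]) ++ [y] by simp]
        rw [ih y ys groups (cur ++ [x]) h, hlast]
      · simp only [pvRunA, pvRunB, hd, ne_eq, not_false_eq_true, if_pos]
        rw [show ([y] : List Int) = [] ++ [y] by simp]
        rw [ih y ys (groups ++ [cur ++ [x]]) [] h, hlast]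

-- B's recursion enumerates pvRunB over all split configs, in product order
lemma pvGoAlt_eq (xs : List Int) (groups : List (List Int)) (cur : List Int) :
    pvGoAlt xs groups cur =
      (pvProdA xs.length).map (fun sc => pvRunB sc xs (groups, cur)) := by
  induction xs generalizing groups cur with
  | nil => simp [pvGoAlt, pvProdA, pvRunB]
  | cons x xs ih =>
    simp only [pvGoAlt, List.length_cons, pvProdA, List.map_append, List.map_map]
    rw [ih groups (cur ++ [x]), ih (groups ++ [cur]) [x]]
    congr 1

lemma pvInnerA_eq (x : Int) (xs sc : List Int) (h : sc.length = xs.length) :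
    pvInnerA (x :: xs) sc = pvRunB sc xs ([], [x]) := by
  unfold pvInnerA
  rw [pvInnerA_loop sc (x :: xs) ([], []) (by simp [h])]
  have hg : PySem.List.pyGetD (x :: xs) (-1) 0 = (x :: xs).getLast (List.cons_ne_nil x xs) := by
    simp [PySem.List.pyGetD, PySem.List.pyGet?_neg_one, List.getLast?_eq_some_getLast]
  rw [hg, ← pvRunA_runB sc x xs [] [] h]
  simp

-- ===== VERDICT (by name: the statement is the Claim_ definition above) =====
theorem get_query_combs_spec : Claim_equal_get_query_combs := by
  intro query _ hpre
  unfold Spec_get_query_combs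
  cases query with
  | nil => exact absurd rfl hpre
  | cons x xs =>
    unfold get_query_combs
    have halt : get_query_combs_alt (x :: xs) = pvGoAlt xs [] [x] := rfl
    rw [halt, PySem.List.foldl_append_singleton_eq_map, pvGoAlt_eq]
    simp only [List.length_cons, Nat.add_sub_cancel, List.nil_append]
    exact List.map_congr_left (fun sc hsc => pvInnerA_eq x xs sc (pvProdA_length hsc))
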